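-- pv_equiv track=rewrite | github.com/posl/comment_recommendation | script/split_gen/4_time/zh/208_A/2.py | throw_dice
-- ===== SOURCE A (Python) =====
-- def throw_dice(n, m):
--     if (n < 1 or m < 1):
--         return False
--     if (n == 1):
--         if (m >= 1 and m <= 6):
--             return True
--         else:
--             return False
--     else:
--         return throw_dice(n - 1, m - 1) or throw_dice(n - 1, m - 2) or throw_dice(n - 1, m - 3) or throw_dice(n - 1, m - 4) or throw_dice(n - 1, m - 5) or throw_dice(n - 1, m - 6)
-- ===== SOURCE B (Python) =====
-- def throw_dice(n, m):
--     # closed form: n dice (faces 1..6) can sum to m iff n >= 1 and n <= m <= 6*n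
--     return n >= 1 and n <= m <= 6 * n
-- ===== Notes on version B (the rewrite author's own statement) =====
-- stated objective: faster
-- what changed: Replaces the 6-way exponential recursion with the closed-form range test n >= 1 and n <= m <= 6*n.
-- outside the precondition, e.g. on throw_dice(960, 1000): A returns True, B returns True; on throw_dice(200000, 200001): A raises RecursionError, B returns True
import Mathlib
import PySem

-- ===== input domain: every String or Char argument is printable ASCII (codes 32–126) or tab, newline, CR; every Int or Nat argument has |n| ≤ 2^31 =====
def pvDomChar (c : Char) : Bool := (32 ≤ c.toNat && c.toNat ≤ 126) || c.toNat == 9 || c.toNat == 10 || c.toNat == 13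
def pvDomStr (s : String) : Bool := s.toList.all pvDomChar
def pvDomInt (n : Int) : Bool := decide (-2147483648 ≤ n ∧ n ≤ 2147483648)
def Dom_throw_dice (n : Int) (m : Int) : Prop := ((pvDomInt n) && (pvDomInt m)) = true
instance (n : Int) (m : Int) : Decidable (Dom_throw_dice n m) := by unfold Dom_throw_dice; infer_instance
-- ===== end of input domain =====

-- B replaces A's 6-way recursion by the closed-form range test n ≥ 1 ∧ n ≤ m ≤ 6n (faster; exact same values everywhere).


-- ===== PORT A =====
def throw_dice (n : Int) (m : Int) : Bool :=
  if n < 1 ∨ m < 1 then false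
  else if n = 1 then
    if m ≥ 1 ∧ m ≤ 6 then true else false
  else
    throw_dice (n - 1) (m - 1) || throw_dice (n - 1) (m - 2) || throw_dice (n - 1) (m - 3) ||
    throw_dice (n - 1) (m - 4) || throw_dice (n - 1) (m - 5) || throw_dice (n - 1) (m - 6)
termination_by n.toNat
decreasing_by all_goals omega

-- ===== PORT B =====
def throw_dice_alt (n : Int) (m : Int) : Bool :=
  decide (n ≥ 1 ∧ n ≤ m ∧ m ≤ 6 * n)

-- ===== PRECONDITION & SPEC =====
-- Pre_ excludes the deep-recursion inputs (n ≥ 951 and m ≥ 950), where A's leftmost recursion chain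
-- (depth ≈ min(n-1, m)) reaches CPython's recursion limit and raises RecursionError; a small safety band
-- below the exact limit (which depends on the interpreter's current stack depth) is excluded with it.
def Pre_throw_dice (n : Int) (m : Int) : Prop := n < 951 ∨ m < 950
instance (n : Int) (m : Int) : Decidable (Pre_throw_dice n m) := by unfold Pre_throw_dice; infer_instance
def pvWitness_throw_dice : Int × Int := (3, 10)
def Spec_throw_dice (n : Int) (m : Int) (out : Bool) : Prop := out = throw_dice_alt n m
instance (n : Int) (m : Int) (out : Bool) : Decidable (Spec_throw_dice n m out) := by unfold Spec_throw_dice; infer_instance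

-- ===== CLAIM (what is proved, stated in full; the proofs are below) =====
def Claim_equal_throw_dice : Prop := ∀ (n : Int) (m : Int), Dom_throw_dice n m → Pre_throw_dice n m → Spec_throw_dice n m (throw_dice n m)

-- ===== LEMMAS AND PROOFS =====

theorem throw_dice_closed (n m : Int) :
    throw_dice n m = decide (n ≥ 1 ∧ n ≤ m ∧ m ≤ 6 * n) := by
  rw [throw_dice]
  split_ifs with h1 h2 h3
  · simp; omega
  · simp; omega
  · simp; omega
  · rw [throw_dice_closed (n - 1) (m - 1), throw_dice_closed (n - 1) (m - 2),
       throw_dice_closed (n - 1) (m - 3), throw_dice_closed (n - 1) (m - 4),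
       throw_dice_closed (n - 1) (m - 5), throw_dice_closed (n - 1) (m - 6)]
    rw [Bool.eq_iff_iff]
    simp only [Bool.or_eq_true, decide_eq_true_eq]
    omega
termination_by n.toNat
decreasing_by all_goals omega

-- ===== VERDICT (by name: the statement is the Claim_ definition above) =====
theorem throw_dice_spec : Claim_equal_throw_dice := by
  intro n m _ _
  unfold Spec_throw_dice throw_dice_alt
  exact throw_dice_closed n m
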